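-- pv_equiv track=rewrite | github.com/illiaxpwnz/goit-pnc-hw-02 | permutation-2.py | create_key_sequence
-- ===== SOURCE A (Python) =====
-- def create_key_sequence(key):
--     key = key.upper()
--     sorted_key = sorted(list(key))
--     key_sequence = []
--     for char in key:
--         index = sorted_key.index(char) + 1
--         key_sequence.append(index)
--         sorted_key[index - 1] = None  # Уникаємо дублювання
--     return key_sequence
-- ===== SOURCE B (Python) =====
-- def create_key_sequence(key):
--     ks = key.upper()
--     less = {c: sum(d < c for d in ks) for c in set(ks)}
--     seen = {}
--     seq = []
--     for c in ks:
--         seen[c] = seen.get(c, 0) + 1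
--         seq.append(less[c] + seen[c])
--     return seq
-- ===== Notes on version B (the rewrite author's own statement) =====
-- stated objective: faster
-- what changed: B replaces A's per-character linear .index search in a destructively blanked sorted copy by counting: one pass per distinct character computes how many characters are smaller, and a running occurrence dict turns each rank into (smaller-count) + (occurrences so far), with no sort and no mutation of a scratch list.
import Mathlib
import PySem

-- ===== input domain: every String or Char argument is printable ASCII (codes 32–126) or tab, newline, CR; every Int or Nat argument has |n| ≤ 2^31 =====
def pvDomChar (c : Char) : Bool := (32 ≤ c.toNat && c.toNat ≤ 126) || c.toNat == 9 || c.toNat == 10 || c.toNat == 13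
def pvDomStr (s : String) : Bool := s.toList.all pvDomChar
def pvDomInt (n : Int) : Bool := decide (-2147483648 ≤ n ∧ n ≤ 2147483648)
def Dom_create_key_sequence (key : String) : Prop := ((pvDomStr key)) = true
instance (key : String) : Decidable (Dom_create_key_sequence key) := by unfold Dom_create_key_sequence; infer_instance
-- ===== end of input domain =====

-- B replaces A's destructive .index search in a mutated sorted copy by counting: per distinct
-- char the number of smaller chars, plus a running occurrence counter; objective: faster (no sort, no inner rescans).

-- ===== PORT A =====
-- A's loop body: look up char in the (partially consumed) sorted copy, append 1-based
-- index, blank that slot.  The 'none' branch is unreachable (each char of key occurs in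
-- its own sorted copy, so Python's .index never raises ValueError here).
def cksStepA (st : List (Option Char) × List Int) (char : Char) : List (Option Char) × List Int :=
  match PySem.List.index? st.1 (some char) with
  | some i => (st.1.set i none, st.2 ++ [(i : Int) + 1])
  | none => (st.1, st.2)

def create_key_sequence (key : String) : List Int :=
  let key := PySem.Str.upper key
  let sorted_key := PySem.List.sorted key.toList (fun c => c) false
  let st := key.toList.foldl cksStepA (sorted_key.map some, [])
  st.2

-- ===== PORT B =====
-- B's loop body: bump the occurrence counter for c, append less[c] + seen[c]
def cksStepB (less : PySem.Dict Char Int) (st : PySem.Dict Char Int × List Int) (c : Char) :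
    PySem.Dict Char Int × List Int :=
  let seen' := st.1.insert c (st.1.getD c 0 + 1)
  (seen', st.2 ++ [less.getD c 0 + seen'.getD c 0])

def create_key_sequence_alt (key : String) : List Int :=
  let ks := (PySem.Str.upper key).toList
  let less : PySem.Dict Char Int :=
    (PySem.Set.ofList ks).foldl
      (fun d c => d.insert c (ks.foldl (fun acc d' => acc + (if d' < c then (1 : Int) else 0)) 0))
      PySem.Dict.empty
  -- less[c] cannot raise KeyError: every char of ks is a key of less (c ∈ set(ks))
  let st := ks.foldl (cksStepB less) (PySem.Dict.empty, [])
  st.2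

-- ===== PRECONDITION & SPEC =====
def Spec_create_key_sequence (key : String) (out : List Int) : Prop := out = create_key_sequence_alt key
instance (key : String) (out : List Int) : Decidable (Spec_create_key_sequence key out) := by unfold Spec_create_key_sequence; infer_instance

-- ===== CLAIM (what is proved, stated in full; the proofs are below) =====
def Claim_equal_create_key_sequence : Prop := ∀ (key : String), Dom_create_key_sequence key → Spec_create_key_sequence key (create_key_sequence key)

-- ===== LEMMAS AND PROOFS =====

-- number of characters of l strictly below c
def cksLt (l : List Char) (c : Char) : Nat := (l.filter (fun d => d < c)).length

-- the sorted copy with, for each char c, its first (m c) slots blanked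
def cksMask : List Char → (Char → Nat) → List (Option Char)
  | [], _ => []
  | c :: t, m =>
    if m c = 0 then some c :: cksMask t m
    else none :: cksMask t (Function.update m c (m c - 1))

-- the sequence A appends while consuming rest, given base ranks and consumed counts m
def cksOut (base : Char → Nat) : List Char → (Char → Nat) → List Int
  | [], _ => []
  | c :: r, m => ((base c + m c + 1 : Nat) : Int) :: cksOut base r (Function.update m c (m c + 1))

theorem cksMask_zero (s : List Char) : cksMask s (fun _ => 0) = s.map some := by
  induction s with
  | nil => rfl
  | cons c t ih => simp [cksMask, ih]

theorem cksLt_head_zero (c : Char) (t : List Char) (hs : (c :: t).Pairwise (· ≤ ·)) :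
    cksLt (c :: t) c = 0 := by
  simp only [cksLt, List.filter_cons, decide_eq_true_eq]
  rw [if_neg (by simp)]
  rw [List.pairwise_cons] at hs
  have : t.filter (fun d => d < c) = [] := by
    apply List.filter_eq_nil_iff.mpr
    intro d hd
    simpa using not_lt.mpr (hs.1 d hd)
  simp [this]

theorem cksMask_index (s : List Char) (m : Char → Nat) (c : Char)
    (hs : s.Pairwise (· ≤ ·)) (hc : m c < s.count c) (hall : ∀ d, m d ≤ s.count d) :
    PySem.List.index? (cksMask s m) (some c) = some (cksLt s c + m c) := by
  induction s generalizing m with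
  | nil => simp [List.count_nil] at hc
  | cons c0 t ih =>
    have hpt : t.Pairwise (· ≤ ·) := (List.pairwise_cons.mp hs).2
    have hle : ∀ d ∈ t, c0 ≤ d := (List.pairwise_cons.mp hs).1
    by_cases h0 : m c0 = 0
    · rw [cksMask, if_pos h0]
      by_cases hcc : c0 = c
      · subst hcc
        rw [PySem.List.index?_cons_self]
        rw [cksLt_head_zero c0 t hs, h0]
      · have hcm : c ∈ t := by
          have : c ∈ c0 :: t := List.count_pos_iff.mp (Nat.lt_of_le_of_lt (Nat.zero_le _) hc)
          rcases this with _ | h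
          · exact absurd rfl hcc
          · assumption
        have hlt : c0 < c := lt_of_le_of_ne (hle c hcm) hcc
        rw [PySem.List.index?_cons_of_ne _ (by simpa using hcc)]
        have hc' : m c < t.count c := by
          rwa [List.count_cons_of_ne (by simpa using hcc)] at hc
        have hall' : ∀ d, m d ≤ t.count d := by
          intro d
          by_cases hd : d = c0
          · subst hd; omega
          · have := hall d
            rwa [List.count_cons_of_ne (by simpa using Ne.symm hd)] at this
        rw [ih m hpt hc' hall']
        simp only [Option.map_some]
        congr 1
        simp only [cksLt, List.filter_cons, decide_eq_true_eq]
        rw [if_pos hlt]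
        simp [Nat.add_comm, Nat.add_left_comm]
    · rw [cksMask, if_neg h0]
      rw [PySem.List.index?_cons_of_ne _ (by simp)]
      by_cases hcc : c0 = c
      · subst hcc
        have hc' : Function.update m c0 (m c0 - 1) c0 < t.count c0 := by
          simp only [Function.update_self]
          have := hc; rw [List.count_cons_self] at this; omega
        have hall' : ∀ d, Function.update m c0 (m c0 - 1) d ≤ t.count d := by
          intro d
          by_cases hd : d = c0
          · subst hd; simp only [Function.update_self]
            have := hall d; rw [List.count_cons_self] at this; omega
          · rw [Function.update_of_ne hd]
            have := hall d
            rwa [List.count_cons_of_ne (by simpa using Ne.symm hd)] at this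
        rw [ih _ hpt hc' hall']
        simp only [Option.map_some, Function.update_self]
        congr 1
        rw [cksLt_head_zero c0 t hs]
        have h2 : cksLt t c0 = 0 := by
          have := cksLt_head_zero c0 t hs
          simp only [cksLt, List.filter_cons, decide_eq_true_eq] at this
          rw [if_neg (by simp)] at this
          simpa [cksLt] using this
        omega
      · have hcm : c ∈ t := by
          have : c ∈ c0 :: t := List.count_pos_iff.mp (Nat.lt_of_le_of_lt (Nat.zero_le _) hc)
          rcases this with _ | h
          · exact absurd rfl hcc
          · assumption
        have hlt : c0 < c := lt_of_le_of_ne (hle c hcm) hcc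
        have hc' : Function.update m c0 (m c0 - 1) c < t.count c := by
          rw [Function.update_of_ne (Ne.symm hcc)]
          rwa [List.count_cons_of_ne (by simpa using hcc)] at hc
        have hall' : ∀ d, Function.update m c0 (m c0 - 1) d ≤ t.count d := by
          intro d
          by_cases hd : d = c0
          · subst hd; simp only [Function.update_self]
            have := hall d; rw [List.count_cons_self] at this; omega
          · rw [Function.update_of_ne hd]
            have := hall d
            rwa [List.count_cons_of_ne (by simpa using Ne.symm hd)] at this
        rw [ih _ hpt hc' hall']
        simp only [Option.map_some, Function.update_of_ne (Ne.symm hcc)]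
        congr 1
        simp only [cksLt, List.filter_cons, decide_eq_true_eq]
        rw [if_pos hlt]
        simp [Nat.add_comm, Nat.add_left_comm]

theorem cksMask_set (s : List Char) (m : Char → Nat) (c : Char)
    (hs : s.Pairwise (· ≤ ·)) (hc : m c < s.count c) (hall : ∀ d, m d ≤ s.count d) :
    (cksMask s m).set (cksLt s c + m c) none = cksMask s (Function.update m c (m c + 1)) := by
  induction s generalizing m with
  | nil => simp [List.count_nil] at hc
  | cons c0 t ih =>
    have hpt : t.Pairwise (· ≤ ·) := (List.pairwise_cons.mp hs).2
    have hle : ∀ d ∈ t, c0 ≤ d := (List.pairwise_cons.mp hs).1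
    by_cases h0 : m c0 = 0
    · rw [cksMask, if_pos h0]
      by_cases hcc : c0 = c
      · subst hcc
        rw [cksLt_head_zero c0 t hs, h0]
        simp only [Nat.add_zero, Nat.zero_add, List.set_cons_zero]
        rw [cksMask]
        rw [if_neg (by simp [Function.update_self])]
        congr 1
        congr 1
        funext d
        by_cases hd : d = c0
        · rw [hd]; simp [h0]
        · simp [Function.update_of_ne hd]
      · have hcm : c ∈ t := by
          have : c ∈ c0 :: t := List.count_pos_iff.mp (Nat.lt_of_le_of_lt (Nat.zero_le _) hc)
          rcases this with _ | h
          · exact absurd rfl hcc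
          · assumption
        have hlt : c0 < c := lt_of_le_of_ne (hle c hcm) hcc
        have hfil : cksLt (c0 :: t) c = cksLt t c + 1 := by
          simp only [cksLt, List.filter_cons, decide_eq_true_eq]
          rw [if_pos hlt]; simp [Nat.add_comm]
        rw [hfil]
        have harr : cksLt t c + 1 + m c = (cksLt t c + m c) + 1 := by omega
        rw [harr, List.set_cons_succ]
        rw [cksMask]
        rw [if_pos (by rw [Function.update_of_ne hcc]; exact h0)]
        congr 1
        apply ih
        · exact hpt
        · rwa [List.count_cons_of_ne (by simpa using hcc)] at hc
        · intro d
          by_cases hd : d = c0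
          · subst hd; omega
          · have := hall d
            rwa [List.count_cons_of_ne (by simpa using Ne.symm hd)] at this
    · rw [cksMask, if_neg h0]
      by_cases hcc : c0 = c
      · subst hcc
        rw [cksLt_head_zero c0 t hs]
        have hm1 : 0 + m c0 = (m c0 - 1) + 1 := by omega
        rw [hm1, List.set_cons_succ]
        have h2 : cksLt t c0 = 0 := by
          have h3 : ∀ d ∈ t, ¬ d < c0 := fun d hd => not_lt.mpr (hle d hd)
          simp only [cksLt]
          rw [List.filter_eq_nil_iff.mpr (by intro d hd; simpa using h3 d hd)]
          rfl
        have hc' : Function.update m c0 (m c0 - 1) c0 < t.count c0 := by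
          simp only [Function.update_self]
          have := hc; rw [List.count_cons_self] at this; omega
        have hall' : ∀ d, Function.update m c0 (m c0 - 1) d ≤ t.count d := by
          intro d
          by_cases hd : d = c0
          · subst hd; simp only [Function.update_self]
            have := hall d; rw [List.count_cons_self] at this; omega
          · rw [Function.update_of_ne hd]
            have := hall d
            rwa [List.count_cons_of_ne (by simpa using Ne.symm hd)] at this
        have := ih (Function.update m c0 (m c0 - 1)) hpt hc' hall'
        rw [h2] at this
        simp only [Function.update_self, Nat.zero_add] at this ⊢
        rw [this]
        rw [cksMask]
        rw [if_neg (by simp [Function.update_self])]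
        congr 1
        congr 1
        funext d
        by_cases hd : d = c0
        · subst hd; simp [Function.update_self]; omega
        · simp [Function.update_of_ne hd]
      · have hcm : c ∈ t := by
          have : c ∈ c0 :: t := List.count_pos_iff.mp (Nat.lt_of_le_of_lt (Nat.zero_le _) hc)
          rcases this with _ | h
          · exact absurd rfl hcc
          · assumption
        have hlt : c0 < c := lt_of_le_of_ne (hle c hcm) hcc
        have hfil : cksLt (c0 :: t) c = cksLt t c + 1 := by
          simp only [cksLt, List.filter_cons, decide_eq_true_eq]
          rw [if_pos hlt]; simp [Nat.add_comm]
        rw [hfil]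
        have harr : cksLt t c + 1 + m c = (cksLt t c + m c) + 1 := by omega
        rw [harr, List.set_cons_succ]
        have hc' : Function.update m c0 (m c0 - 1) c < t.count c := by
          rw [Function.update_of_ne (Ne.symm hcc)]
          rwa [List.count_cons_of_ne (by simpa using hcc)] at hc
        have hall' : ∀ d, Function.update m c0 (m c0 - 1) d ≤ t.count d := by
          intro d
          by_cases hd : d = c0
          · subst hd; simp only [Function.update_self]
            have := hall d; rw [List.count_cons_self] at this; omega
          · rw [Function.update_of_ne hd]
            have := hall d
            rwa [List.count_cons_of_ne (by simpa using Ne.symm hd)] at this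
        have := ih (Function.update m c0 (m c0 - 1)) hpt hc' hall'
        rw [Function.update_of_ne (Ne.symm hcc)] at this
        rw [this]
        rw [cksMask]
        rw [if_neg (by rw [Function.update_of_ne (fun h => hcc (by simpa using h))]; exact h0)]
        congr 1
        congr 1
        funext d
        by_cases hd : d = c0
        · subst hd
          simp only [Function.update_self, Function.update_of_ne hcc]
        · by_cases hd2 : d = c
          · subst hd2
            simp [Function.update_self, Function.update_of_ne (Ne.symm hcc)]
          · simp [Function.update_of_ne hd, Function.update_of_ne hd2]

-- the A-side loop, characterised
theorem cksLoopA (cs : List Char) (rest : List Char) (m : Char → Nat) (acc : List Int)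
    (hinv : ∀ d, m d + rest.count d = cs.count d) :
    (rest.foldl cksStepA (cksMask (PySem.List.sorted cs (fun c => c) false) m, acc)).2
      = acc ++ cksOut (cksLt cs) rest m := by
  induction rest generalizing m acc with
  | nil => simp [cksOut]
  | cons c r ih =>
    set s := PySem.List.sorted cs (fun c => c) false with hsdef
    have hperm : s.Perm cs := PySem.List.sorted_perm cs (fun c => c) false
    have hs : s.Pairwise (· ≤ ·) := by
      simpa using PySem.List.sorted_pairwise cs (fun c => c)
    have hcount : ∀ d, s.count d = cs.count d := fun d => hperm.count_eq d
    have hcltscs : cksLt s c = cksLt cs c := by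
      simp only [cksLt]
      exact (hperm.filter _).length_eq
    have hc : m c < s.count c := by
      have := hinv c
      rw [List.count_cons_self] at this
      rw [hcount]; omega
    have hall : ∀ d, m d ≤ s.count d := by
      intro d; have := hinv d; rw [hcount]; omega
    simp only [List.foldl_cons]
    rw [show cksStepA (cksMask s m, acc) c
        = (cksMask s (Function.update m c (m c + 1)),
           acc ++ [((cksLt cs c + m c + 1 : Nat) : Int)]) from ?_]
    · rw [ih _ _ ?_]
      · simp [cksOut]
      · intro d
        by_cases hd : d = c
        · subst hd
          have := hinv d
          rw [List.count_cons_self] at this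
          simp [Function.update_self]; omega
        · rw [Function.update_of_ne hd]
          have := hinv d
          rwa [List.count_cons_of_ne (by simpa using Ne.symm hd)] at this
    · have hidx := cksMask_index s m c hs hc hall
      unfold cksStepA
      rw [hidx]
      simp only []
      rw [cksMask_set s m c hs hc hall]
      rw [hcltscs]
      have hcast : ((cksLt cs c + m c : Nat) : Int) + 1
          = ((cksLt cs c + m c + 1 : Nat) : Int) := by push_cast; ring
      rw [hcast]

-- B's inner sum is cksLt
theorem cksSum_eq (l : List Char) (c : Char) (a : Int) :
    l.foldl (fun acc d => acc + (if d < c then (1 : Int) else 0)) a = a + (cksLt l c : Nat) := by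
  induction l generalizing a with
  | nil => simp [cksLt]
  | cons d r ih =>
    simp only [List.foldl_cons]
    rw [ih]
    simp only [cksLt, List.filter_cons, decide_eq_true_eq]
    by_cases hd : d < c
    · rw [if_pos hd, if_pos hd]
      simp only [List.length_cons]
      push_cast; ring
    · rw [if_neg hd, if_neg hd]
      ring_nf

-- B equals the characterisation with m = 0
theorem getD_foldl_insert_not_mem (l : List Char) (f : Char → Int)
    (d0 : PySem.Dict Char Int) (c : Char) (hc : c ∉ l) :
    (l.foldl (fun d x => d.insert x (f x)) d0).getD c 0 = d0.getD c 0 := by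
  induction l generalizing d0 with
  | nil => rfl
  | cons x t ih =>
    simp only [List.foldl_cons]
    rw [ih _ (fun h => hc (List.mem_cons_of_mem _ h))]
    have hcx : c ≠ x := fun h => hc (by rw [h]; exact List.mem_cons_self)
    rw [PySem.Dict.getD_insert, if_neg hcx]

theorem getD_foldl_insert_mem (l : List Char) (f : Char → Int)
    (d0 : PySem.Dict Char Int) (c : Char) (hc : c ∈ l) :
    (l.foldl (fun d x => d.insert x (f x)) d0).getD c 0 = f c := by
  induction l generalizing d0 with
  | nil => simp at hc
  | cons x t ih =>
    simp only [List.foldl_cons]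
    by_cases ht : c ∈ t
    · exact ih _ ht
    · have hx : c = x := by
        rcases List.mem_cons.mp hc with h | h
        · exact h
        · exact absurd h ht
      subst hx
      rw [getD_foldl_insert_not_mem t f _ c ht, PySem.Dict.getD_insert_self]

-- the B-side occurrence loop, characterised
theorem cksLoopB (ks : List Char) (less : PySem.Dict Char Int)
    (hless : ∀ c ∈ ks, less.getD c 0 = ((cksLt ks c : Nat) : Int))
    (rest : List Char) (m : Char → Nat) (seen : PySem.Dict Char Int) (acc : List Int)
    (hsub : ∀ c ∈ rest, c ∈ ks) (hseen : ∀ c, seen.getD c 0 = ((m c : Nat) : Int)) :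
    (rest.foldl (cksStepB less) (seen, acc)).2 = acc ++ cksOut (cksLt ks) rest m := by
  induction rest generalizing m seen acc with
  | nil => simp [cksOut]
  | cons c r ih =>
    simp only [List.foldl_cons]
    have hmem : c ∈ ks := hsub c List.mem_cons_self
    have hval : less.getD c 0 + ((seen.insert c (seen.getD c 0 + 1)).getD c 0)
        = ((cksLt ks c + m c + 1 : Nat) : Int) := by
      rw [PySem.Dict.getD_insert_self, hless c hmem, hseen c]
      push_cast; ring
    have hstep : cksStepB less (seen, acc) c
        = (seen.insert c (seen.getD c 0 + 1),
           acc ++ [((cksLt ks c + m c + 1 : Nat) : Int)]) := by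
      show (seen.insert c (seen.getD c 0 + 1),
            acc ++ [less.getD c 0 + (seen.insert c (seen.getD c 0 + 1)).getD c 0]) = _
      rw [hval]
    rw [hstep]
    rw [ih (Function.update m c (m c + 1)) _ _
        (fun d hd => hsub d (List.mem_cons_of_mem _ hd)) ?_]
    · simp [cksOut]
    · intro d
      rw [PySem.Dict.getD_insert]
      by_cases hd : d = c
      · subst hd
        rw [if_pos rfl, Function.update_self, hseen d]
        push_cast; ring
      · rw [if_neg hd, Function.update_of_ne hd, hseen d]

-- B equals the characterisation with m = 0
theorem cksAltChar (key : String) :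
    create_key_sequence_alt key
      = cksOut (cksLt (PySem.Str.upper key).toList) (PySem.Str.upper key).toList (fun _ => 0) := by
  unfold create_key_sequence_alt
  set ks := (PySem.Str.upper key).toList with hks
  simp only []
  rw [cksLoopB ks _ ?_ ks (fun _ => 0) PySem.Dict.empty [] (fun _ h => h)
      (fun c => by rw [PySem.Dict.getD_empty]; rfl)]
  · simp
  · intro c hc
    rw [getD_foldl_insert_mem _ _ _ c (by
      simpa using (PySem.Set.mem_ofList (xs := ks) (y := c)).mpr hc)]
    rw [cksSum_eq]
    simp

-- ===== VERDICT (by name: the statement is the Claim_ definition above) =====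
theorem create_key_sequence_spec : Claim_equal_create_key_sequence := by
  intro key _
  unfold Spec_create_key_sequence
  rw [cksAltChar]
  unfold create_key_sequence
  simp only []
  rw [← cksMask_zero (PySem.List.sorted (PySem.Str.upper key).toList (fun c => c) false)]
  rw [cksLoopA _ _ _ _ (by intro d; simp)]
  simp
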